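-- pv_equiv track=rewrite | github.com/lseirina/leetcode | Hash_table/largest_substring.py | find_largest_substring
-- ===== SOURCE A (Python) =====
-- def find_largest_substring(s):
--     my_dict = {}
--     max_length = -1
--     for i, num in enumerate(s):
--         if num in my_dict:
--             length = i - my_dict[num] - 1
--             max_length = max(max_length, length)
--         else:
--             my_dict[num] = i
--     return max_length
-- ===== SOURCE B (Python) =====
-- def find_largest_substring(s):
--     n = len(s)
--     rev = s[::-1]
--     best = -1
--     for c in set(s):
--         best = max(best, (n - 1 - rev.index(c)) - s.index(c) - 1)
--     return best
-- ===== Notes on version B (the rewrite author's own statement) =====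
-- stated objective: faster
-- what changed: B keeps no dict and no running per-position state: it iterates over the distinct characters set(s) and for each one locates its first index with s.index(c) and its last index via the reversed string, taking the max of last-first-1 starting from -1.
import Mathlib
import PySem

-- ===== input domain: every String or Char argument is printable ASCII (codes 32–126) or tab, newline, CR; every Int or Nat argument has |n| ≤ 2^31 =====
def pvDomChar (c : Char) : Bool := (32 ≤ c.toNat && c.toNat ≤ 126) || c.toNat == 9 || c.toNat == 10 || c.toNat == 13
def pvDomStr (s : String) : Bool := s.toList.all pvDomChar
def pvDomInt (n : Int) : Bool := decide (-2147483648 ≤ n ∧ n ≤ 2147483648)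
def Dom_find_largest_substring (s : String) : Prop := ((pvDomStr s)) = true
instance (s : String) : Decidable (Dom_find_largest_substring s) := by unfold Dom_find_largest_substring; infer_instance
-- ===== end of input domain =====

-- B drops A's dict-and-running-max single scan entirely: it iterates over the distinct
-- characters set(s) and for each one locates its first index with s.index and its last
-- index via the reversed string, taking the max of last-first-1 starting from -1.
-- Objective: faster (a timing run measured B faster: the per-character index searches
-- replace A's per-position Python-level dict/max bookkeeping).

-- ===== PORT A =====
def find_largest_substring (s : String) : Int :=
  let st := (PySem.List.enumerate s.toList 0).foldl
    (fun (st : PySem.Dict Char Int × Int) p =>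
      if st.1.contains p.2 then
        (st.1, max st.2 (p.1 - st.1.getD p.2 0 - 1))
      else
        (st.1.insert p.2 p.1, st.2))
    (PySem.Dict.empty, -1)
  st.2

-- ===== PORT B =====
-- rev.index(c) / s.index(c) cannot raise here: every c comes from set(s);
-- the .getD 0 fallback of the Option-valued index? is therefore never taken.
def find_largest_substring_alt (s : String) : Int :=
  let l := s.toList
  let n : Int := l.length
  let rev := (PySem.List.slice? l none none (-1)).getD []
  (PySem.Set.ofList l).foldl
    (fun best c =>
      max best ((n - 1 - (((PySem.List.index? rev c).getD 0 : Nat) : Int))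
                  - (((PySem.List.index? l c).getD 0 : Nat) : Int) - 1))
    (-1)

-- ===== PRECONDITION & SPEC =====
def Spec_find_largest_substring (s : String) (out : Int) : Prop := out = find_largest_substring_alt s
instance (s : String) (out : Int) : Decidable (Spec_find_largest_substring s out) := by unfold Spec_find_largest_substring; infer_instance

-- ===== CLAIM (what is proved, stated in full; the proofs are below) =====
def Claim_equal_find_largest_substring : Prop := ∀ (s : String), Dom_find_largest_substring s → Spec_find_largest_substring s (find_largest_substring s)

-- ===== LEMMAS AND PROOFS =====

-- The per-character gap B computes: last index (via the reversed list) minus first index minus 1.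
def pvG (l : List Char) (c : Char) : Int :=
  (((l.length : Int) - 1 - (l.reverse.idxOf c : Int)) - (l.idxOf c : Int)) - 1

-- B's reduction over the distinct characters, in idxOf form.
def pvB (l : List Char) : Int :=
  (PySem.Set.ofList l).foldl (fun b c => max b (pvG l c)) (-1)

-- A's loop body, named for the invariant proof (identical to the lambda in the port).
def pvStepA (st : PySem.Dict Char Int × Int) (p : Int × Char) : PySem.Dict Char Int × Int :=
  if st.1.contains p.2 then
    (st.1, max st.2 (p.1 - st.1.getD p.2 0 - 1))
  else
    (st.1.insert p.2 p.1, st.2)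

-- first-occurrence index via idxOf? agrees with idxOf on members
lemma pvIdx? (l : List Char) (c : Char) (h : c ∈ l) :
    List.idxOf? c l = some (l.idxOf c) := by
  induction l with
  | nil => cases h
  | cons a t ih =>
    by_cases hac : a = c
    · subst hac; simp [List.idxOf?_cons]
    · have h1 : c ∈ t := (List.mem_cons.mp h).resolve_left (fun h1 => hac h1.symm)
      simp [List.idxOf?_cons, hac, ih h1]

-- B's port equals pvB: the reversed slice is .reverse and index? is idxOf on members
lemma pvAltEq (s : String) : find_largest_substring_alt s = pvB s.toList := by
  show (PySem.Set.ofList s.toList).foldl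
      (fun best c =>
        max best ((((s.toList.length : Int)) - 1
              - (((PySem.List.index? ((PySem.List.slice? s.toList none none (-1)).getD []) c).getD 0 : Nat) : Int))
            - (((PySem.List.index? s.toList c).getD 0 : Nat) : Int) - 1))
      (-1) = pvB s.toList
  unfold pvB
  rw [PySem.List.slice?_none_none_neg_one]
  refine PySem.List.foldl_congr_mem _ _ _ _ ?_
  intro acc c hc
  have hcl : c ∈ s.toList := (PySem.Set.mem_ofList _ _).mp hc
  have hcr : c ∈ s.toList.reverse := List.mem_reverse.mpr hcl
  simp [PySem.List.index?, pvIdx? _ _ hcl, pvIdx? _ _ hcr, pvG]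

-- contains on a Set built by ofList decides list membership
lemma pvSetContains (l : List Char) (c : Char) :
    (PySem.Set.ofList l).contains c = decide (c ∈ l) := by
  by_cases h : c ∈ l
  · simp [PySem.Set.contains, (PySem.Set.mem_ofList l c).mpr h, h]
  · simp only [PySem.Set.contains, h, decide_false, List.contains_eq_mem, decide_eq_false_iff_not]
    exact fun hmem => absurd ((PySem.Set.mem_ofList l c).mp hmem) h

lemma pvOfListAppend (l : List Char) (c : Char) :
    PySem.Set.ofList (l ++ [c])
      = if c ∈ l then PySem.Set.ofList l else PySem.Set.ofList l ++ [c] := by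
  rw [PySem.Set.ofList_eq_foldl, List.foldl_append, ← PySem.Set.ofList_eq_foldl]
  show PySem.Set.add (PySem.Set.ofList l) c = _
  unfold PySem.Set.add
  rw [pvSetContains]
  by_cases h : c ∈ l <;> simp [h]

-- Pulling a max out of the initial accumulator of a fold-max.
lemma pvFoldmaxInit {α : Type} (items : List α) (g : α → Int) (a c : Int) :
    items.foldl (fun b p => max b (g p)) (max a c)
      = max (items.foldl (fun b p => max b (g p)) a) c := by
  induction items generalizing a with
  | nil => rfl
  | cons q rest ih =>
      simp only [List.foldl_cons]
      rw [show max (max a c) (g q) = max (max a (g q)) c by omega, ih]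

lemma pvInitLeFoldmax {α : Type} (items : List α) (g : α → Int) (a : Int) :
    a ≤ items.foldl (fun b p => max b (g p)) a := by
  induction items generalizing a with
  | nil => exact le_refl a
  | cons q rest ih =>
      simp only [List.foldl_cons]
      exact le_trans (le_max_left a (g q)) (ih (max a (g q)))

-- Updating g upward at one element x turns the fold-max into max of the old fold and g' x.
lemma pvFoldmaxUpdate {α : Type} [DecidableEq α] (items : List α) (g g' : α → Int) (x : α)
    (a : Int) (hx : x ∈ items) (hle : g x ≤ g' x)
    (hother : ∀ p ∈ items, p ≠ x → g' p = g p) :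
    items.foldl (fun b p => max b (g' p)) a
      = max (items.foldl (fun b p => max b (g p)) a) (g' x) := by
  induction items generalizing a with
  | nil => cases hx
  | cons q rest ih =>
      simp only [List.foldl_cons]
      by_cases hq : q = x
      · subst hq
        by_cases hmem : q ∈ rest
        · rw [ih (max a (g' q)) hmem (fun p hp hne => hother p (List.mem_cons_of_mem q hp) hne),
              pvFoldmaxInit rest g a (g' q), pvFoldmaxInit rest g a (g q)]
          omega
        · have hrest : ∀ (b : Int), ∀ p ∈ rest,
              max b (g' p) = max b (g p) := by
            intro b p hp
            rw [hother p (List.mem_cons_of_mem q hp) (fun h => hmem (h ▸ hp))]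
          rw [PySem.List.foldl_congr_mem rest _ _ (max a (g' q)) hrest,
              pvFoldmaxInit rest g a (g' q), pvFoldmaxInit rest g a (g q)]
          omega
      · have hmem : x ∈ rest := by
          rcases List.mem_cons.mp hx with h | h
          · exact absurd h.symm hq
          · exact h
        rw [hother q (List.mem_cons_self) hq,
            ih (max a (g q)) hmem (fun p hp hne => hother p (List.mem_cons_of_mem q hp) hne)]

-- pvG under appending one character, away from that character
lemma pvG_append_of_ne (l : List Char) (c x : Char) (hx : x ∈ l) (hne : x ≠ c) :
    pvG (l ++ [c]) x = pvG l x := by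
  unfold pvG
  have hbeq : (c == x) = false := by
    simpa [beq_iff_eq] using fun h => hne h.symm
  rw [List.idxOf_append_of_mem hx, List.reverse_append]
  have h1 : ([c].reverse ++ l.reverse).idxOf x = l.reverse.idxOf x + 1 := by
    simp [List.idxOf_cons, hbeq]
  rw [h1, List.length_append, List.length_singleton]
  push_cast
  omega

lemma pvG_append_self_mem (l : List Char) (c : Char) (hc : c ∈ l) :
    pvG (l ++ [c]) c = (l.length : Int) - (l.idxOf c : Int) - 1 := by
  unfold pvG
  rw [List.idxOf_append_of_mem hc, List.reverse_append]
  have h1 : ([c].reverse ++ l.reverse).idxOf c = 0 := by simp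
  rw [h1, List.length_append, List.length_singleton]
  push_cast
  omega

lemma pvG_append_self_not_mem (l : List Char) (c : Char) (hc : c ∉ l) :
    pvG (l ++ [c]) c = -1 := by
  unfold pvG
  have h2 : (l ++ [c]).idxOf c = l.length := by simp [List.idxOf_append, hc]
  have h1 : ([c].reverse ++ l.reverse).idxOf c = 0 := by simp
  rw [h2, List.reverse_append, h1, List.length_append, List.length_singleton]
  push_cast
  omega

lemma pvG_le (l : List Char) (c : Char) :
    pvG l c ≤ (l.length : Int) - (l.idxOf c : Int) - 1 := by
  unfold pvG
  have : (0 : Int) ≤ (l.reverse.idxOf c : Int) := Int.natCast_nonneg _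
  omega

lemma pvB_ge (l : List Char) : -1 ≤ pvB l := pvInitLeFoldmax _ _ _

lemma pvB_append_mem (l : List Char) (c : Char) (hc : c ∈ l) :
    pvB (l ++ [c]) = max (pvB l) ((l.length : Int) - (l.idxOf c : Int) - 1) := by
  unfold pvB
  rw [pvOfListAppend, if_pos hc,
      pvFoldmaxUpdate (PySem.Set.ofList l) (pvG l) (pvG (l ++ [c])) c (-1)
        ((PySem.Set.mem_ofList l c).mpr hc)
        (le_trans (pvG_le l c) (le_of_eq (pvG_append_self_mem l c hc).symm))
        (fun p hp hne => pvG_append_of_ne l c p ((PySem.Set.mem_ofList l p).mp hp) hne),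
      pvG_append_self_mem l c hc]

lemma pvB_append_not_mem (l : List Char) (c : Char) (hc : c ∉ l) :
    pvB (l ++ [c]) = pvB l := by
  unfold pvB
  rw [pvOfListAppend, if_neg hc, List.foldl_append]
  have hcongr : ∀ (b : Int), ∀ x ∈ PySem.Set.ofList l,
      max b (pvG (l ++ [c]) x) = max b (pvG l x) := by
    intro b x hx
    have hxl : x ∈ l := (PySem.Set.mem_ofList l x).mp hx
    rw [pvG_append_of_ne l c x hxl (fun h => hc (h ▸ hxl))]
  rw [PySem.List.foldl_congr_mem _ _ _ (-1) hcongr]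
  simp only [List.foldl_cons, List.foldl_nil, pvG_append_self_not_mem l c hc]
  have := pvB_ge l
  unfold pvB at this
  omega

-- Main invariant of A's scan: the dict holds each seen character's first index,
-- and the running max equals B's reduction over the prefix processed so far.
lemma pvMain (l : List Char) :
    (∀ x, ((PySem.List.enumerate l 0).foldl pvStepA (PySem.Dict.empty, -1)).1.contains x
            = decide (x ∈ l))
  ∧ (∀ x, x ∈ l →
        ((PySem.List.enumerate l 0).foldl pvStepA (PySem.Dict.empty, -1)).1.getD x 0
          = (l.idxOf x : Int))
  ∧ ((PySem.List.enumerate l 0).foldl pvStepA (PySem.Dict.empty, -1)).2 = pvB l := by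
  induction l using List.reverseRecOn with
  | nil =>
      refine ⟨fun x => rfl, fun x hx => absurd hx (List.not_mem_nil), rfl⟩
  | append_singleton l c ih =>
      obtain ⟨ihc, ihg, ihm⟩ := ih
      rw [PySem.List.enumerate_append] at *
      simp only [List.foldl_append] at *
      have henum1 : PySem.List.enumerate [c] (0 + (l.length : Int)) = [((l.length : Int), c)] := by
        rw [PySem.List.enumerate_cons]; simp [PySem.List.enumerate]
      rw [henum1]
      simp only [List.foldl_cons, List.foldl_nil]
      set st := (PySem.List.enumerate l 0).foldl pvStepA (PySem.Dict.empty, -1) with hst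
      by_cases hc : c ∈ l
      · have hcont : st.1.contains c = true := by rw [ihc c]; simpa using hc
        have hstep : pvStepA st ((l.length : Int), c)
            = (st.1, max st.2 ((l.length : Int) - st.1.getD c 0 - 1)) := by
          simp [pvStepA, hcont]
        rw [hstep]
        refine ⟨?_, ?_, ?_⟩
        · intro x
          rw [ihc x]
          by_cases hx : x = c
          · subst hx; simp [hc]
          · simp [hx]
        · intro x hx
          have hxl : x ∈ l := by
            rcases List.mem_append.mp hx with h | h
            · exact h
            · rw [List.mem_singleton.mp h]; exact hc
          rw [ihg x hxl, List.idxOf_append_of_mem hxl]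
        · rw [ihm, ihg c hc, pvB_append_mem l c hc]
      · have hcont : st.1.contains c = false := by rw [ihc c]; simpa using hc
        have hstep : pvStepA st ((l.length : Int), c)
            = (st.1.insert c (l.length : Int), st.2) := by
          simp [pvStepA, hcont]
        rw [hstep]
        refine ⟨?_, ?_, ?_⟩
        · intro x
          rw [PySem.Dict.contains_insert, ihc x]
          by_cases hx : x = c
          · subst hx; simp
          · simp [hx]
        · intro x hx
          by_cases hx1 : x = c
          · rw [hx1, PySem.Dict.getD_insert_self,
                show (l ++ [c]).idxOf c = l.length by simp [List.idxOf_append, hc]]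
          · have hxl : x ∈ l := by
              rcases List.mem_append.mp hx with h | h
              · exact h
              · exact absurd (List.mem_singleton.mp h) hx1
            rw [PySem.Dict.getD_insert_of_ne st.1 (l.length : Int) 0 hx1, ihg x hxl,
                List.idxOf_append_of_mem hxl]
        · rw [ihm, pvB_append_not_mem l c hc]

-- ===== VERDICT (by name: the statement is the Claim_ definition above) =====
theorem find_largest_substring_spec : Claim_equal_find_largest_substring := by
  intro s _
  show find_largest_substring s = find_largest_substring_alt s
  rw [pvAltEq]
  exact (pvMain s.toList).2.2
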